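-- pv_equiv track=rewrite | github.com/nash23234/Portafolio1.2 | Laboratorio2.py | Unioascendente_aux
-- ===== SOURCE A (Python) =====
-- def Unioascendente_aux(num,simi,pote):
--     if (num==0):
--         return 0
--     else:
--         if(pote==0):
--             return (num%10)*10**pote+Unioascendente_aux(num//10,num%10,pote+1)
--         if ((num%10)>=simi):
--             return  (num%10)*10**pote+Unioascendente_aux(num//10,num%10,pote+1)
--         else:
--             return Unioascendente_aux (num//10,simi,pote)
-- ===== SOURCE B (Python) =====
-- def Unioascendente_aux(num, simi, pote):
--     res = 0
--     while num != 0: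
--         d = num % 10
--         if pote == 0 or d >= simi:
--             res += d * 10 ** pote
--             simi = d
--             pote += 1
--         num //= 10
--     return res
-- ===== Notes on version B (the rewrite author's own statement) =====
-- stated objective: simpler
-- what changed: Replaced the three-branch recursion by a single iterative while-loop with a result accumulator, merging the pote==0 and d>=simi accept branches into one condition.
-- outside the precondition, e.g. on Unioascendente_aux(3, 5, -1): A returns 0, B returns 0
import Mathlib
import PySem

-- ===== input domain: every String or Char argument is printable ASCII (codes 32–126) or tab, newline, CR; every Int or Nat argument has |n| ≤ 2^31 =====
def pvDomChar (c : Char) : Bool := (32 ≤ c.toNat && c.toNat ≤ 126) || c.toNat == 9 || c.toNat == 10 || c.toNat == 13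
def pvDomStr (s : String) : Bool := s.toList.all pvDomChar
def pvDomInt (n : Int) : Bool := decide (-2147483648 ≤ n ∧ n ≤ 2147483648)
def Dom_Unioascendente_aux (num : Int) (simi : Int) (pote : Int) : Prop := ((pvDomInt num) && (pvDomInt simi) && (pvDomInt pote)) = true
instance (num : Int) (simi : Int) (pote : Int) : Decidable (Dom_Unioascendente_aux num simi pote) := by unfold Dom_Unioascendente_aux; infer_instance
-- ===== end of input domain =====

-- ===== PORT A =====
-- B is a simpler iterative re-decomposition of A's recursion; equal return values are proved on Pre_.
-- recursion guard: for num ≤ 0 the Python A either returns 0 (num = 0) or never terminates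
-- (num < 0, excluded by Pre_); the guard only totalises the same computation.
def Unioascendente_aux (num : Int) (simi : Int) (pote : Int) : Int :=
  if h : num ≤ 0 then 0
  else
    if pote = 0 then
      (PySem.Int.mod num 10) * 10 ^ pote.toNat
        + Unioascendente_aux (PySem.Int.floordiv num 10) (PySem.Int.mod num 10) (pote + 1)
    else if PySem.Int.mod num 10 ≥ simi then
      (PySem.Int.mod num 10) * 10 ^ pote.toNat
        + Unioascendente_aux (PySem.Int.floordiv num 10) (PySem.Int.mod num 10) (pote + 1)
    else
      Unioascendente_aux (PySem.Int.floordiv num 10) simi pote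
termination_by num.toNat
decreasing_by
  all_goals
    rw [PySem.Int.floordiv_eq_ediv_of_pos (by norm_num : (0:Int) < 10)]
    omega

-- ===== PORT B =====
-- the while-loop of Source B, as a tail-recursive accumulator loop (guard totalises num < 0, excluded by Pre_)
def Unioascendente_auxLoop (num : Int) (simi : Int) (pote : Int) (res : Int) : Int :=
  if h : num ≤ 0 then res
  else
    let d := PySem.Int.mod num 10
    if pote = 0 ∨ d ≥ simi then
      Unioascendente_auxLoop (PySem.Int.floordiv num 10) d (pote + 1) (res + d * 10 ^ pote.toNat)
    else
      Unioascendente_auxLoop (PySem.Int.floordiv num 10) simi pote res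
termination_by num.toNat
decreasing_by
  all_goals
    rw [PySem.Int.floordiv_eq_ediv_of_pos (by norm_num : (0:Int) < 10)]
    omega

def Unioascendente_aux_alt (num : Int) (simi : Int) (pote : Int) : Int :=
  Unioascendente_auxLoop num simi pote 0

-- ===== PRECONDITION & SPEC =====
-- Pre_ excludes negative num, where Python A recurses forever (RecursionError) and B's while-loop
-- never ends, and negative pote, where A returns a float (10**pote) whenever a digit is accepted;
-- when every digit is rejected under a negative pote, A still returns the int 0, which B matches anyway.
def Pre_Unioascendente_aux (num : Int) (simi : Int) (pote : Int) : Prop := 0 ≤ num ∧ 0 ≤ pote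
instance (num : Int) (simi : Int) (pote : Int) : Decidable (Pre_Unioascendente_aux num simi pote) := by unfold Pre_Unioascendente_aux; infer_instance
def pvWitness_Unioascendente_aux : Int × Int × Int := (1234, 0, 0)
def Spec_Unioascendente_aux (num : Int) (simi : Int) (pote : Int) (out : Int) : Prop := out = Unioascendente_aux_alt num simi pote
instance (num : Int) (simi : Int) (pote : Int) (out : Int) : Decidable (Spec_Unioascendente_aux num simi pote out) := by unfold Spec_Unioascendente_aux; infer_instance

-- ===== CLAIM (what is proved, stated in full; the proofs are below) =====
def Claim_equal_Unioascendente_aux : Prop := ∀ (num : Int) (simi : Int) (pote : Int), Dom_Unioascendente_aux num simi pote → Pre_Unioascendente_aux num simi pote → Spec_Unioascendente_aux num simi pote (Unioascendente_aux num simi pote)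

-- ===== LEMMAS AND PROOFS =====

-- loop invariant: the accumulator splits off additively, so the loop equals res + A's recursion
theorem Unioascendente_auxLoop_eq (num simi pote res : Int) :
    Unioascendente_auxLoop num simi pote res = res + Unioascendente_aux num simi pote := by
  induction num, simi, pote using Unioascendente_aux.induct generalizing res with
  | case1 num simi pote h =>
      rw [Unioascendente_auxLoop, Unioascendente_aux]
      simp [h]
  | case2 num simi h ih =>
      simp only [PySem.Int.floordiv_eq_ediv_of_pos (show (0:Int) < 10 by norm_num),
        PySem.Int.mod_eq_emod_of_pos (show (0:Int) < 10 by norm_num), zero_add] at ih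
      rw [Unioascendente_auxLoop, Unioascendente_aux]
      simp [h]
      rw [ih]
      ring
  | case3 num simi pote h hp hge ih =>
      have hge' : simi ≤ num % 10 := by
        rwa [PySem.Int.mod_eq_emod_of_pos (by norm_num : (0:Int) < 10)] at hge
      simp only [PySem.Int.floordiv_eq_ediv_of_pos (show (0:Int) < 10 by norm_num),
        PySem.Int.mod_eq_emod_of_pos (show (0:Int) < 10 by norm_num)] at ih
      rw [Unioascendente_auxLoop, Unioascendente_aux]
      simp [h, hp, hge']
      rw [ih]
      ring
  | case4 num simi pote h hp hge ih =>
      have hge' : ¬ simi ≤ num % 10 := by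
        rwa [PySem.Int.mod_eq_emod_of_pos (by norm_num : (0:Int) < 10)] at hge
      simp only [PySem.Int.floordiv_eq_ediv_of_pos (show (0:Int) < 10 by norm_num)] at ih
      rw [Unioascendente_auxLoop, Unioascendente_aux]
      simp [h, hp, hge']
      exact ih res

-- ===== VERDICT (by name: the statement is the Claim_ definition above) =====
theorem Unioascendente_aux_spec : Claim_equal_Unioascendente_aux := by
  intro num simi pote _ _
  unfold Spec_Unioascendente_aux Unioascendente_aux_alt
  rw [Unioascendente_auxLoop_eq]
  ring
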